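-- pv_equiv track=rewrite | github.com/pypi-data/pypi-mirror-81 | packages/MobileElementFinder/MobileElementFinder-1.0.3.tar.gz/MobileElementFinder-1.0.3/me_finder/tools/blast.py | _blast_aln_to_cigar
-- ===== SOURCE A (Python) =====
-- def _blast_aln_to_cigar(reference, target):
--     """Convert blast alignement to CIGAR string.
--
--     operations
--     ----------
--     M 	match
--     I 	insert a gap into the reference sequence
--     D 	insert a gap into the target (delete from reference)
--     F 	frameshift forward in the reference sequence
--     R 	frameshift reverse in the reference sequence
--     """
--     cigar = []
--     curr_operation = None
--     length = 1
--     for ref, alt in zip(reference, target):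
--         # identify operation
--         if ref == alt:
--             operation = 'M'
--         elif ref == '-':
--             operation = 'I'
--         elif alt == '-':
--             operation = 'D'
--         elif ref != alt:
--             operation = 'M'
--         else:
--             # sanity check
--             raise ValueError(f'ref: {ref}, alt: {alt}')
--
--         if curr_operation is None:
--             curr_operation = operation
--         elif operation != curr_operation:
--             cigar.append(f'{curr_operation}{length}')
--             curr_operation = operation
--             length = 1
--         else:
--             length += 1
--     cigar.append(f'{curr_operation}{length}')
--     return ' '.join(cigar)
-- ===== SOURCE B (Python) =====
-- def _blast_aln_to_cigar(reference, target):
--     """Convert blast alignment to CIGAR string (classify pass + run-length pass)."""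
--     ops = ''.join(
--         'I' if r == '-' and r != a else 'D' if a == '-' and r != a else 'M'
--         for r, a in zip(reference, target)
--     )
--     parts = []
--     i = 0
--     while i < len(ops):
--         j = i
--         while j < len(ops) and ops[j] == ops[i]:
--             j += 1
--         parts.append(f'{ops[i]}{j - i}')
--         i = j
--     return ' '.join(parts)
-- ===== Notes on version B (the rewrite author's own statement) =====
-- stated objective: simpler
-- what changed: Two-pass decomposition: first map each aligned pair to its operation character, then run-length-encode that string by scanning maximal runs, instead of A's single interleaved loop threading a current-operation/length accumulator; B also drops A's accidental 'None1' sentinel on empty alignments.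
-- intended difference: When reference or target is empty the zip is empty, A's curr_operation stays None and it returns the accidental literal 'None1'; B returns '' (no operations), which is the intended CIGAR of an empty alignment. — e.g. on _blast_aln_to_cigar("", "A"): A returns "None1", B returns ""
import Mathlib
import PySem

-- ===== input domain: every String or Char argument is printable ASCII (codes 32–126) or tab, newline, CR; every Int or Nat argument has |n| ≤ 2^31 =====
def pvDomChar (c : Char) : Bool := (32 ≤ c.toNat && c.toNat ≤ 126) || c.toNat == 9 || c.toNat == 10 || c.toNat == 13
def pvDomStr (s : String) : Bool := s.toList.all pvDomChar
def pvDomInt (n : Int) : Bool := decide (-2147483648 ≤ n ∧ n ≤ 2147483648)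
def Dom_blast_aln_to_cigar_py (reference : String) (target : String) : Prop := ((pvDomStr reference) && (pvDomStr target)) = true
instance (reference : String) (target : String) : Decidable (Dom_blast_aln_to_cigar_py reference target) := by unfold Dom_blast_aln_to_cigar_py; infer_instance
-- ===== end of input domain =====

-- B replaces A's interleaved accumulator loop with a classify pass followed by a
-- run-length-encoding pass (simpler decomposition); on empty alignments B returns ''
-- instead of A's accidental 'None1' (stated as intended difference D_).


-- ===== PORT A =====
-- one loop step of A: state (cigar, curr_operation, length), inline classification
def pvStepA (st : List String × Option Char × Int) (p : Char × Char) :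
    List String × Option Char × Int :=
  let operation : Char :=
    if p.1 = p.2 then 'M'
    else if p.1 = '-' then 'I'
    else if p.2 = '-' then 'D'
    else 'M'   -- A's 'elif ref != alt' branch; the trailing 'raise' is unreachable
  match st with
  | (cigar, none, length) => (cigar, some operation, length)
  | (cigar, some c, length) =>
    if operation ≠ c then
      (cigar ++ [String.mk [c] ++ PySem.Int.toStr length], some operation, 1)
    else (cigar, some c, length + 1)

def blast_aln_to_cigar_py (reference : String) (target : String) : String :=
  let st := (List.zip reference.toList target.toList).foldl pvStepA ([], none, 1)
  match st with
  | (cigar, curr, length) =>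
    let fin := (match curr with | none => "None" | some c => String.mk [c]) ++
               PySem.Int.toStr length
    PySem.Str.join " " (cigar ++ [fin])

-- ===== PORT B =====
-- classify one zipped pair (B's conditional-expression order)
def pvClassifyB (r a : Char) : Char :=
  if r = '-' ∧ r ≠ a then 'I' else if a = '-' ∧ r ≠ a then 'D' else 'M'

-- B's inner while loop scans the maximal run at i; ported as takeWhile/dropWhile
def pvRleB : List Char → List String
  | [] => []
  | c :: cs =>
    (String.mk [c] ++ PySem.Int.toStr ((cs.takeWhile (· = c)).length + 1)) ::
      pvRleB (cs.dropWhile (· = c))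
termination_by l => l.length
decreasing_by
  simp only [List.length_cons]
  exact Nat.lt_succ_of_le (List.length_dropWhile_le _ _)

def blast_aln_to_cigar_py_alt (reference : String) (target : String) : String :=
  let ops := (List.zip reference.toList target.toList).map (fun p => pvClassifyB p.1 p.2)
  PySem.Str.join " " (pvRleB ops)

-- ===== PRECONDITION & SPEC =====
-- When reference or target is empty the zip is empty, A's curr_operation stays None and it
-- returns the accidental literal "None1"; B returns "" (no operations), the intended CIGAR
-- of an empty alignment.
def D_blast_aln_to_cigar_py (reference : String) (target : String) : Prop :=
  reference = "" ∨ target = ""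
instance (reference : String) (target : String) : Decidable (D_blast_aln_to_cigar_py reference target) := by unfold D_blast_aln_to_cigar_py; infer_instance

def Spec_blast_aln_to_cigar_py (reference : String) (target : String) (out : String) : Prop :=
  ¬ D_blast_aln_to_cigar_py reference target → out = blast_aln_to_cigar_py_alt reference target
instance (reference : String) (target : String) (out : String) : Decidable (Spec_blast_aln_to_cigar_py reference target out) := by unfold Spec_blast_aln_to_cigar_py; infer_instance

def pvDiffWitness_blast_aln_to_cigar_py : String × String := ("", "A")
def pvDiffWitnessOut_blast_aln_to_cigar_py : String × String := ("None1", "")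

-- ===== CLAIM (what is proved, stated in full; the proofs are below) =====
def Claim_unchanged_blast_aln_to_cigar_py : Prop := ∀ (reference : String) (target : String), Dom_blast_aln_to_cigar_py reference target → Spec_blast_aln_to_cigar_py reference target (blast_aln_to_cigar_py reference target)
def Claim_changed_blast_aln_to_cigar_py : Prop := Dom_blast_aln_to_cigar_py (pvDiffWitness_blast_aln_to_cigar_py.1) (pvDiffWitness_blast_aln_to_cigar_py.2) ∧ D_blast_aln_to_cigar_py (pvDiffWitness_blast_aln_to_cigar_py.1) (pvDiffWitness_blast_aln_to_cigar_py.2) ∧ blast_aln_to_cigar_py (pvDiffWitness_blast_aln_to_cigar_py.1) (pvDiffWitness_blast_aln_to_cigar_py.2) = pvDiffWitnessOut_blast_aln_to_cigar_py.1 ∧ blast_aln_to_cigar_py_alt (pvDiffWitness_blast_aln_to_cigar_py.1) (pvDiffWitness_blast_aln_to_cigar_py.2) = pvDiffWitnessOut_blast_aln_to_cigar_py.2 ∧ pvDiffWitnessOut_blast_aln_to_cigar_py.1 ≠ pvDiffWitnessOut_blast_aln_to_cigar_py.2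
def Claim_exact_blast_aln_to_cigar_py : Prop := ∀ (reference : String) (target : String), Dom_blast_aln_to_cigar_py reference target → D_blast_aln_to_cigar_py reference target → blast_aln_to_cigar_py reference target ≠ blast_aln_to_cigar_py_alt reference target

-- ===== LEMMAS AND PROOFS =====

-- A's inline operation equals B's classifier
lemma classify_eq (r a : Char) :
    (if r = a then 'M' else if r = '-' then 'I' else if a = '-' then 'D' else 'M')
      = pvClassifyB r a := by
  unfold pvClassifyB
  by_cases h : r = a
  · subst h; simp
  · by_cases hr : r = '-' <;> by_cases ha : a = '-' <;> simp_all

-- run-length continuation: A's loop kernel once curr_operation is set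
def pvRleCont (c : Char) (len : Int) : List Char → List String
  | [] => [String.mk [c] ++ PySem.Int.toStr len]
  | o :: os =>
    if o = c then pvRleCont c (len + 1) os
    else (String.mk [c] ++ PySem.Int.toStr len) :: pvRleCont o 1 os

-- A's loop body on its classified operation character
def pvStepOp (st : List String × Option Char × Int) (op : Char) :
    List String × Option Char × Int :=
  match st with
  | (cigar, none, length) => (cigar, some op, length)
  | (cigar, some c, length) =>
    if op ≠ c then
      (cigar ++ [String.mk [c] ++ PySem.Int.toStr length], some op, 1)
    else (cigar, some c, length + 1)

lemma stepA_eq_stepOp (st : List String × Option Char × Int) (p : Char × Char) :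
    pvStepA st p = pvStepOp st (pvClassifyB p.1 p.2) := by
  obtain ⟨cigar, curr, len⟩ := st
  cases curr <;> simp [pvStepA, pvStepOp, classify_eq]

-- the final append A performs after the loop, as a function of the loop state
def pvFin (st : List String × Option Char × Int) : List String :=
  st.1 ++ [(match st.2.1 with | none => "None" | some c' => String.mk [c']) ++
           PySem.Int.toStr st.2.2]

lemma foldOp_eq_rleCont (ops : List Char) :
    ∀ (cigar : List String) (c : Char) (len : Int),
    pvFin (ops.foldl pvStepOp (cigar, some c, len)) = cigar ++ pvRleCont c len ops := by
  induction ops with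
  | nil => intro cigar c len; simp [pvRleCont, pvFin]
  | cons o os ih =>
    intro cigar c len
    simp only [List.foldl_cons, pvRleCont]
    by_cases h : o = c
    · subst h
      have hs : pvStepOp (cigar, some o, len) o = (cigar, some o, len + 1) := by
        simp [pvStepOp]
      rw [hs, ih, if_pos rfl]
    · have hs : pvStepOp (cigar, some c, len) o
          = (cigar ++ [String.mk [c] ++ PySem.Int.toStr len], some o, 1) := by
        simp [pvStepOp, h]
      rw [hs, ih, if_neg h, List.append_assoc]
      simp

-- pvRleCont with count ↑n+1 is the head-run of B's RLE
lemma rleCont_eq_rleB (ops : List Char) :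
    ∀ (c : Char) (n : Nat),
    pvRleCont c ((n : Int) + 1) ops
      = (String.mk [c] ++ PySem.Int.toStr (((ops.takeWhile (· = c)).length : Int) + (n + 1)))
          :: pvRleB (ops.dropWhile (· = c)) := by
  induction ops with
  | nil => intro c n; simp [pvRleCont, pvRleB]
  | cons o os ih =>
    intro c n
    by_cases h : o = c
    · subst h
      have h1 : pvRleCont o ((n : Int) + 1) (o :: os) = pvRleCont o ((n + 1 : Nat) + 1) os := by
        simp [pvRleCont]
      have ht : (o :: os).takeWhile (· = o) = o :: os.takeWhile (· = o) := by
        simp [List.takeWhile_cons]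
      have hd : (o :: os).dropWhile (· = o) = os.dropWhile (· = o) := by
        simp [List.dropWhile_cons]
      have harg : (((os.takeWhile (· = o)).length : Int) + ((n + 1 : Nat) + 1))
          = (((o :: os.takeWhile (· = o)).length : Int) + ((n : Int) + 1)) := by
        simp only [List.length_cons]; push_cast; ring
      rw [h1, ih, ht, hd, harg]
    · have h1 : pvRleCont c ((n : Int) + 1) (o :: os)
          = (String.mk [c] ++ PySem.Int.toStr ((n : Int) + 1)) :: pvRleCont o ((0 : Nat) + 1) os := by
        simp [pvRleCont, h]
      have ht : (o :: os).takeWhile (· = c) = [] := by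
        simp [List.takeWhile_cons, h]
      have hd : (o :: os).dropWhile (· = c) = o :: os := by
        simp [List.dropWhile_cons, h]
      rw [h1, ih, ht, hd]
      have h2 : pvRleB (o :: os)
          = (String.mk [o] ++ PySem.Int.toStr (((os.takeWhile (· = o)).length : Int) + 1))
              :: pvRleB (os.dropWhile (· = o)) := by
        rw [pvRleB]
      rw [h2]
      norm_num

-- ===== VERDICT (by name: the statement is the Claim_ definition above) =====
theorem blast_aln_to_cigar_py_spec : Claim_unchanged_blast_aln_to_cigar_py := by
  intro reference target _ hD
  have hr : reference.toList ≠ [] := by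
    intro h
    exact hD (Or.inl (String.toList_eq_nil_iff.mp h))
  have ht : target.toList ≠ [] := by
    intro h
    exact hD (Or.inr (String.toList_eq_nil_iff.mp h))
  unfold blast_aln_to_cigar_py blast_aln_to_cigar_py_alt
  cases hz : List.zip reference.toList target.toList with
  | nil =>
    exfalso
    rcases List.zip_eq_nil_iff.mp hz with h | h
    · exact hr h
    · exact ht h
  | cons p ps =>
    have hfold : ∀ (st : List String × Option Char × Int) (l : List (Char × Char)),
        l.foldl pvStepA st = (l.map (fun q => pvClassifyB q.1 q.2)).foldl pvStepOp st := by
      intro st l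
      induction l generalizing st with
      | nil => rfl
      | cons q qs ih => simp [List.foldl_cons, stepA_eq_stepOp, ih]
    simp only [hz, hfold, List.map_cons, List.foldl_cons]
    have h1 : pvStepOp ([], none, 1) (pvClassifyB p.1 p.2)
        = ([], some (pvClassifyB p.1 p.2), 1) := by simp [pvStepOp]
    rw [h1]
    have h2 := foldOp_eq_rleCont (ps.map (fun q => pvClassifyB q.1 q.2)) []
        (pvClassifyB p.1 p.2) 1
    have h3 := rleCont_eq_rleB (ps.map (fun q => pvClassifyB q.1 q.2)) (pvClassifyB p.1 p.2) 0
    simp only [Nat.cast_zero, zero_add] at h3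
    have h4 : pvRleB (pvClassifyB p.1 p.2 :: ps.map (fun q => pvClassifyB q.1 q.2))
        = (String.mk [pvClassifyB p.1 p.2] ++
            PySem.Int.toStr ((((ps.map (fun q => pvClassifyB q.1 q.2)).takeWhile
              (· = pvClassifyB p.1 p.2)).length : Int) + (0 + 1)))
          :: pvRleB ((ps.map (fun q => pvClassifyB q.1 q.2)).dropWhile
              (· = pvClassifyB p.1 p.2)) := by
      rw [pvRleB]; push_cast; ring_nf
    rcases hfo : (ps.map (fun q => pvClassifyB q.1 q.2)).foldl pvStepOp
        ([], some (pvClassifyB p.1 p.2), 1) with ⟨cig, curr, l⟩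
    rw [hfo] at h2
    simp only [pvFin, List.nil_append] at h2
    rw [hfo, h2, h3, h4]
    norm_num

theorem blast_aln_to_cigar_py_changed : Claim_changed_blast_aln_to_cigar_py := by
  unfold Claim_changed_blast_aln_to_cigar_py
  have hz : List.zip ("" : String).toList ("A" : String).toList = [] := by decide
  refine ⟨by decide, by decide, ?_, ?_, by decide⟩
  · show blast_aln_to_cigar_py "" "A" = "None1"
    unfold blast_aln_to_cigar_py
    rw [hz]
    decide
  · show blast_aln_to_cigar_py_alt "" "A" = ""
    unfold blast_aln_to_cigar_py_alt
    rw [hz]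
    simp only [List.map_nil, pvRleB]
    decide

theorem blast_aln_to_cigar_py_tight : Claim_exact_blast_aln_to_cigar_py := by
  intro reference target _ hD
  have hz : List.zip reference.toList target.toList = [] := by
    rcases hD with h | h <;> subst h <;> simp
  unfold blast_aln_to_cigar_py blast_aln_to_cigar_py_alt
  rw [hz]
  simp only [List.foldl_nil, List.map_nil, pvRleB]
  decide
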